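-- pv_equiv track=rewrite | github.com/davidmzeng/beat-the-landlord | beat_the_landlord.py | is_quad_with_two_singles
-- ===== SOURCE A (Python) =====
-- RANK_ORDER = ("3", "4", "5", "6", "7", "8", "9", "10", "J", "Q", "K", "A", "2", "B", "R")
--
-- def is_quad_with_two_singles(combo):
--     """
--     Takes a combo as an argument and returns True if it is a "quad with two singles" combo type,
--     returns False otherwise
--     """
--     if len(combo) != 6: # check for invalid number of cards
--         return False
--     for card in combo: # check for invalid cards
--         if card not in RANK_ORDER:
--             return False
--     if "B" in combo and "R" in combo: # check for invalid combo - both Jokers cannot be used in combo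
--         return False
--     rank_counts = {}
--     for card in combo: # put combo into a dictionary representing frequency of each card
--         if card not in rank_counts:
--             rank_counts[card] = 1
--         else:
--             rank_counts[card] += 1
--     for card in combo:
--         if rank_counts[card] != 4 and rank_counts[card] != 1: # check that we have only quads and singles
--             return False
--     counts_list = list(rank_counts.values()) # get all the counts of each rank
--     count_quads = counts_list.count(4) # counts how many quads exist
--     count_singles = counts_list.count(1) # counts how many singles exist
--     return (count_quads == 1 and count_singles == 2)
-- ===== SOURCE B (Python) =====
-- RANK_ORDER = ("3", "4", "5", "6", "7", "8", "9", "10", "J", "Q", "K", "A", "2", "B", "R")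
--
-- def is_quad_with_two_singles(combo):
--     if len(combo) != 6:
--         return False
--     for card in combo:
--         if card not in RANK_ORDER:
--             return False
--     if "B" in combo and "R" in combo:
--         return False
--     # sort the 6 cards: a quad is then a contiguous block of 4 equal cards
--     # starting at index 0, 1 or 2, and the remaining two cards must be
--     # distinct singles (distinct from each other and from the quad rank).
--     s = sorted(combo)
--     if s[0] == s[3]:
--         return s[3] != s[4] and s[4] != s[5]
--     if s[1] == s[4]:
--         return s[0] != s[1] and s[4] != s[5]
--     if s[2] == s[5]:
--         return s[0] != s[1] and s[1] != s[2]
--     return False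
-- ===== Notes on version B (the rewrite author's own statement) =====
-- stated objective: alternative
-- what changed: A builds a frequency dictionary and checks the multiset of counts in three further passes; B instead sorts the 6 cards and pattern-matches the sorted hand for a contiguous block of 4 equal cards (starting at index 0, 1 or 2) followed/preceded by two mutually distinct singles, so no count table exists at all.
import Mathlib
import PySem

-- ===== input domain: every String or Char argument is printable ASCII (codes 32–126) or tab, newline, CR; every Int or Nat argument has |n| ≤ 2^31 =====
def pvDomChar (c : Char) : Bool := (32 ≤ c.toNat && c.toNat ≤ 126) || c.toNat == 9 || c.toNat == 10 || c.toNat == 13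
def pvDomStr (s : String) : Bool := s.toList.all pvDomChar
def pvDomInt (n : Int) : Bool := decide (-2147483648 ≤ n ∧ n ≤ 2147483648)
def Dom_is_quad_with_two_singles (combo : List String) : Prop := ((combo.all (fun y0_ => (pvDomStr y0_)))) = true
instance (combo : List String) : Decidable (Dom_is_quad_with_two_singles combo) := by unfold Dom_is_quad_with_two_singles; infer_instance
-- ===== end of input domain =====

-- B replaces A's frequency dictionary and its three counting passes by sorting the hand
-- and pattern-matching for a contiguous quad block plus two distinct singles (objective: alternative).

def RANK_ORDER : List String :=
  ["3", "4", "5", "6", "7", "8", "9", "10", "J", "Q", "K", "A", "2", "B", "R"]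

-- ===== PORT A =====
def is_quad_with_two_singles (combo : List String) : Bool :=
  if combo.length ≠ 6 then false
  else if combo.any (fun card => !(RANK_ORDER.contains card)) then false  -- 'for card in combo: if card not in RANK_ORDER: return False'
  else if combo.contains "B" && combo.contains "R" then false
  else
    -- 'for card in combo: if card not in rank_counts: rank_counts[card] = 1 else: rank_counts[card] += 1'
    let rank_counts : PySem.Dict String Int :=
      combo.foldl (fun d card =>
        if !(d.contains card) then d.insert card 1
        else d.insert card (d.getD card 0 + 1)) PySem.Dict.empty
    -- 'rank_counts[card]' is ported as getD … 0: every card of combo is a key, so no KeyError is reachable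
    if combo.any (fun card => rank_counts.getD card 0 != 4 && rank_counts.getD card 0 != 1) then false
    else
      let counts_list := rank_counts.values
      let count_quads := PySem.List.count counts_list (4 : Int)
      let count_singles := PySem.List.count counts_list (1 : Int)
      (count_quads == 1 && count_singles == 2)

-- ===== PORT B =====
def is_quad_with_two_singles_alt (combo : List String) : Bool :=
  if combo.length ≠ 6 then false
  else if combo.any (fun card => !(RANK_ORDER.contains card)) then false
  else if combo.contains "B" && combo.contains "R" then false
  else
    -- s = sorted(combo); the six indexed accesses s[0]…s[5] are ported by matching the
    -- length-6 sorted list (sorted preserves length, and length is 6 in this branch)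
    match PySem.List.sorted combo (fun x => x) false with
    | [s0, s1, s2, s3, s4, s5] =>
      if s0 == s3 then s3 != s4 && s4 != s5
      else if s1 == s4 then s0 != s1 && s4 != s5
      else if s2 == s5 then s0 != s1 && s1 != s2
      else false
    | _ => false

-- ===== PRECONDITION & SPEC =====
def Spec_is_quad_with_two_singles (combo : List String) (out : Bool) : Prop := out = is_quad_with_two_singles_alt combo
instance (combo : List String) (out : Bool) : Decidable (Spec_is_quad_with_two_singles combo out) := by unfold Spec_is_quad_with_two_singles; infer_instance

-- ===== CLAIM (what is proved, stated in full; the proofs are below) =====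
def Claim_equal_is_quad_with_two_singles : Prop := ∀ (combo : List String), Dom_is_quad_with_two_singles combo → Spec_is_quad_with_two_singles combo (is_quad_with_two_singles combo)

-- ===== LEMMAS AND PROOFS =====

-- the common characterisation both cores are reduced to: the hand is a permutation of
-- one quad and two distinct singles
def QuadTwo (combo : List String) : Prop :=
  ∃ a b c : String, a ≠ b ∧ a ≠ c ∧ b ≠ c ∧ combo.Perm [a, a, a, a, b, c]

-- A's branched counting step is the uniform 'insert card (getD card 0 + 1)' step
lemma count_step_eq :
    (fun (d : PySem.Dict String Int) card =>
      if !(d.contains card) then d.insert card 1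
      else d.insert card (d.getD card 0 + 1)) =
    (fun (d : PySem.Dict String Int) card => d.insert card (d.getD card 0 + 1)) := by
  funext d card
  by_cases h : d.contains card = true
  · simp [h]
  · simp only [Bool.not_eq_true] at h
    rw [if_pos (by simp [h]), PySem.Dict.getD_of_not_contains d 0 h]
    norm_num

-- the count A's dict holds for each card of the combo
lemma getD_count (combo : List String) (card : String) :
    (combo.foldl (fun d card =>
        if !(d.contains card) then d.insert card 1
        else d.insert card (d.getD card 0 + 1)) PySem.Dict.empty).getD card 0 =
    (List.count card combo : Int) := by
  rw [count_step_eq, PySem.Dict.foldl_insert_getD_add_one_eq_counter]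
  simpa using PySem.Dict.getD_counter combo card

-- the values list A counts over is the per-distinct-card count list
lemma values_eq (combo : List String) :
    (combo.foldl (fun d card =>
        if !(d.contains card) then d.insert card 1
        else d.insert card (d.getD card 0 + 1)) PySem.Dict.empty).values =
    (PySem.Set.ofList combo).map (fun c => (List.count c combo : Int)) := by
  rw [count_step_eq, PySem.Dict.foldl_insert_getD_add_one_eq_counter]
  simp only [PySem.Dict.values, PySem.Dict.items_counter, List.map_map]
  rfl

-- QuadTwo pins down every card count of the combo
lemma counts_of_quadtwo (combo : List String) (a b c : String)
    (hab : a ≠ b) (hac : a ≠ c) (hbc : b ≠ c) (hp : combo.Perm [a, a, a, a, b, c]) :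
    List.count a combo = 4 ∧ List.count b combo = 1 ∧ List.count c combo = 1 ∧
    ∀ x, x ≠ a → x ≠ b → x ≠ c → List.count x combo = 0 := by
  refine ⟨?_, ?_, ?_, ?_⟩
  · rw [hp.count_eq]; simp [List.count_cons, hab.symm, hac.symm]
  · rw [hp.count_eq]; simp [List.count_cons, hab, hbc.symm]
  · rw [hp.count_eq]; simp [List.count_cons, hac, hbc]
  · intro x hxa hxb hxc
    rw [hp.count_eq]
    simp [List.count_cons, Ne.symm hxa, Ne.symm hxb, Ne.symm hxc]

-- A's core (per-card {1,4} pass plus the two value counts) holds iff QuadTwo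
lemma a_core_iff (combo : List String) :
    ((if (combo.any (fun card =>
          (List.count card combo : Int) != 4 && (List.count card combo : Int) != 1)) = true then false
      else
        PySem.List.count ((PySem.Set.ofList combo).map (fun c => (List.count c combo : Int))) (4 : Int) == 1 &&
        PySem.List.count ((PySem.Set.ofList combo).map (fun c => (List.count c combo : Int))) (1 : Int) == 2) = true)
    ↔ QuadTwo combo := by
  constructor
  · intro hA
    by_cases hchk : (combo.any (fun card =>
        (List.count card combo : Int) != 4 && (List.count card combo : Int) != 1)) = true
    · rw [if_pos hchk] at hA; exact absurd hA (by simp)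
    · rw [if_neg hchk] at hA
      rw [Bool.and_eq_true, beq_iff_eq, beq_iff_eq, PySem.List.count_eq, PySem.List.count_eq] at hA
      obtain ⟨h4, h1⟩ := hA
      rw [List.any_eq_true] at hchk
      push_neg at hchk
      -- every per-distinct-card count is 4 or 1
      have hmem : ∀ v ∈ (PySem.Set.ofList combo).map (fun c => (List.count c combo : Int)),
          v = 4 ∨ v = 1 := by
        intro v hv
        obtain ⟨x, hx, rfl⟩ := List.mem_map.mp hv
        have hx' : x ∈ combo := (PySem.Set.mem_ofList combo x).mp hx
        have := hchk x hx'
        simp only [Bool.and_eq_true, bne_iff_ne, ne_eq, not_and_or, not_not] at this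
        exact this
      -- the count list is a permutation of [4, 1, 1]
      have hperm : ((PySem.Set.ofList combo).map
          (fun c => (List.count c combo : Int))).Perm [4, 1, 1] := by
        rw [List.perm_iff_count]
        intro v
        by_cases hv4 : v = 4
        · subst hv4; simpa using h4
        · by_cases hv1 : v = 1
          · subst hv1; simpa using h1
          · have : v ∉ (PySem.Set.ofList combo).map (fun c => (List.count c combo : Int)) :=
              fun hm => by rcases hmem v hm with h | h <;> simp_all
            simp only [List.count_eq_zero_of_not_mem this, List.count_cons, List.count_nil]
            split_ifs <;> simp_all
      have hlenS : (PySem.Set.ofList combo).length = 3 := by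
        have := hperm.length_eq; simpa using this
      obtain ⟨d0, d1, d2, hS⟩ := List.length_eq_three.mp hlenS
      have hnd := PySem.Set.nodup_ofList (xs := combo)
      rw [hS] at hnd hperm
      simp only [List.map_cons, List.map_nil] at hperm
      simp only [List.nodup_cons, List.mem_cons, List.not_mem_nil, or_false,
        List.nodup_nil, and_true, not_or] at hnd
      obtain ⟨⟨h01, h02⟩, h12, -⟩ := hnd
      have hmemS : ∀ x, x ∈ combo ↔ x = d0 ∨ x = d1 ∨ x = d2 := by
        intro x
        rw [← PySem.Set.mem_ofList, hS]; simp
      have e0 : (List.count d0 combo : Int) = 4 ∨ (List.count d0 combo : Int) = 1 := by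
        have h := hperm.subset (a := (List.count d0 combo : Int)) (by simp)
        simpa using h
      have e1 : (List.count d1 combo : Int) = 4 ∨ (List.count d1 combo : Int) = 1 := by
        have h := hperm.subset (a := (List.count d1 combo : Int)) (by simp)
        simpa using h
      have e2 : (List.count d2 combo : Int) = 4 ∨ (List.count d2 combo : Int) = 1 := by
        have h := hperm.subset (a := (List.count d2 combo : Int)) (by simp)
        simpa using h
      have h4' : List.count (4 : Int) [(List.count d0 combo : Int),
          (List.count d1 combo : Int), (List.count d2 combo : Int)] = 1 := by
        rw [hperm.count_eq]; decide
      -- turn the Int count equations into Nat ones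
      have toNat : ∀ x : String, ∀ n : ℕ, (List.count x combo : Int) = (n : Int) →
          List.count x combo = n := fun x n h => by exact_mod_cast h
      -- the hand is a permutation of four copies of the quad rank and the two singles
      have mkperm : ∀ a b c : String, a ≠ b → a ≠ c → b ≠ c →
          List.count a combo = 4 → List.count b combo = 1 → List.count c combo = 1 →
          (∀ x, x ∈ combo ↔ x = a ∨ x = b ∨ x = c) → QuadTwo combo := by
        intro a b c hab hac hbc ha hb hc hmem
        refine ⟨a, b, c, hab, hac, hbc, ?_⟩
        rw [List.perm_iff_count]
        intro x
        by_cases hxa : x = a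
        · subst hxa; simp [List.count_cons, ha, Ne.symm hab, Ne.symm hac]
        · by_cases hxb : x = b
          · subst hxb; simp [List.count_cons, hb, hab, Ne.symm hbc]
          · by_cases hxc : x = c
            · subst hxc; simp [List.count_cons, hc, hac, hbc]
            · have hx : x ∉ combo := fun hm => by
                rcases (hmem x).mp hm with rfl | rfl | rfl <;> simp_all
              rw [List.count_eq_zero_of_not_mem hx]
              simp [List.count_cons, Ne.symm hxa, Ne.symm hxb, Ne.symm hxc]
      have hmemS' : ∀ (a b c : String), (∀ x, x = d0 ∨ x = d1 ∨ x = d2 ↔ x = a ∨ x = b ∨ x = c) →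
          ∀ x, x ∈ combo ↔ x = a ∨ x = b ∨ x = c := by
        intro a b c hiff x
        rw [hmemS x, hiff x]
      rcases e0 with e0 | e0 <;> rcases e1 with e1 | e1 <;> rcases e2 with e2 | e2
      · simp [List.count_cons, e0, e1, e2] at h4'
      · simp [List.count_cons, e0, e1, e2] at h4'
      · simp [List.count_cons, e0, e1, e2] at h4'
      · exact mkperm d0 d1 d2 h01 h02 h12 (toNat _ _ e0) (toNat _ _ e1) (toNat _ _ e2)
          (hmemS' _ _ _ (fun x => Iff.rfl))
      · simp [List.count_cons, e0, e1, e2] at h4'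
      · exact mkperm d1 d0 d2 (Ne.symm h01) h12 h02 (toNat _ _ e1) (toNat _ _ e0) (toNat _ _ e2)
          (hmemS' _ _ _ (fun x => by tauto))
      · exact mkperm d2 d0 d1 (Ne.symm h02) (Ne.symm h12) h01 (toNat _ _ e2) (toNat _ _ e0)
          (toNat _ _ e1) (hmemS' _ _ _ (fun x => by tauto))
      · simp [List.count_cons, e0, e1, e2] at h4'
  · rintro ⟨a, b, c, hab, hac, hbc, hp⟩
    obtain ⟨hca, hcb, hcc, hother⟩ := counts_of_quadtwo combo a b c hab hac hbc hp
    have hmemc : ∀ x, x ∈ combo ↔ x = a ∨ x = b ∨ x = c := by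
      intro x
      rw [hp.mem_iff]; simp <;> tauto
    have hchk : (combo.any (fun card =>
        (List.count card combo : Int) != 4 && (List.count card combo : Int) != 1)) = false := by
      rw [Bool.eq_false_iff, Ne, List.any_eq_true]
      rintro ⟨x, hx, hv⟩
      rcases (hmemc x).mp hx with rfl | rfl | rfl <;> simp [hca, hcb, hcc] at hv
    rw [if_neg (by simp [hchk])]
    have hSperm : (PySem.Set.ofList combo).Perm [a, b, c] := by
      rw [List.perm_iff_count]
      intro x
      by_cases hx : x ∈ combo
      · rw [List.count_eq_one_of_mem (PySem.Set.nodup_ofList (xs := combo))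
            ((PySem.Set.mem_ofList combo x).mpr hx)]
        rcases (hmemc x).mp hx with rfl | rfl | rfl <;>
          simp [List.count_cons, hab, hac, hbc, Ne.symm hab, Ne.symm hac, Ne.symm hbc]
      · have hxn : ¬(x = a ∨ x = b ∨ x = c) := fun h => hx ((hmemc x).mpr h)
        rw [List.count_eq_zero_of_not_mem (fun hm => hx ((PySem.Set.mem_ofList combo x).mp hm)),
          List.count_eq_zero_of_not_mem (by simpa using hxn)]
    have hperm : ((PySem.Set.ofList combo).map
        (fun c => (List.count c combo : Int))).Perm [4, 1, 1] := by
      have := hSperm.map (fun c => (List.count c combo : Int))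
      simpa [hca, hcb, hcc] using this
    rw [Bool.and_eq_true, beq_iff_eq, beq_iff_eq, PySem.List.count_eq, PySem.List.count_eq,
      hperm.count_eq, hperm.count_eq]
    constructor <;> rfl

-- B-side: the sorted-hand pattern, named for the proofs (definitionally B's match expression)
def QuadPattern (combo : List String) : Bool :=
  match PySem.List.sorted combo (fun x => x) false with
  | [s0, s1, s2, s3, s4, s5] =>
    if s0 == s3 then s3 != s4 && s4 != s5
    else if s1 == s4 then s0 != s1 && s4 != s5
    else if s2 == s5 then s0 != s1 && s1 != s2
    else false
  | _ => false

lemma six_of_len {α : Type} (l : List α) (h : l.length = 6) :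
    ∃ a b c d e f, l = [a, b, c, d, e, f] := by
  rcases l with _|⟨a,_|⟨b,_|⟨c,_|⟨d,_|⟨e,_|⟨f,_|⟨g,t⟩⟩⟩⟩⟩⟩⟩ <;>
    first
    | exact ⟨_, _, _, _, _, _, rfl⟩
    | simp at h

-- QuadTwo forces the sorted-hand pattern (total–order case analysis on the three ranks)
lemma pattern_of_quadtwo (combo : List String) (h : QuadTwo combo) :
    QuadPattern combo = true := by
  obtain ⟨a, b, c, hab, hac, hbc, hp⟩ := h
  unfold QuadPattern
  rcases lt_or_gt_of_ne hab with hab | hba <;> rcases lt_or_gt_of_ne hac with hac' | hca <;>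
    rcases lt_or_gt_of_ne hbc with hbc' | hcb
  · -- a < b, a < c, b < c : sorted = [a,a,a,a,b,c]
    rw [PySem.List.sorted_id_eq_of_perm_of_pairwise _ [a,a,a,a,b,c] hp.symm
      (by have l1 : a ≤ b := le_of_lt hab
          have l2 : a ≤ c := le_of_lt hac'
          have l3 : b ≤ c := le_of_lt hbc'
          simp only [List.pairwise_cons, List.mem_cons, List.not_mem_nil, forall_eq_or_imp,
            false_implies, forall_const, and_true, List.Pairwise.nil]
          and_intros <;> first | exact le_refl _ | assumption)]
    simp [hab.ne, hbc'.ne]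
  · -- a < b, a < c, c < b : sorted = [a,a,a,a,c,b]
    rw [PySem.List.sorted_id_eq_of_perm_of_pairwise _ [a,a,a,a,c,b]
      ((List.Perm.append_left [a,a,a,a] (List.Perm.swap b c [])).trans hp.symm)
      (by have l1 : a ≤ b := le_of_lt hab
          have l2 : a ≤ c := le_of_lt hac'
          have l3 : c ≤ b := le_of_lt hcb
          simp only [List.pairwise_cons, List.mem_cons, List.not_mem_nil, forall_eq_or_imp,
            false_implies, forall_const, and_true, List.Pairwise.nil]
          and_intros <;> first | exact le_refl _ | assumption)]
    simp [hac'.ne, hcb.ne]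
  · -- a < b, c < a, b < c : impossible
    exact absurd (hab.trans (hbc'.trans hca)) (lt_irrefl a)
  · -- a < b, c < a, c < b : sorted = [c,a,a,a,a,b]
    rw [PySem.List.sorted_id_eq_of_perm_of_pairwise _ [c,a,a,a,a,b]
      (((List.perm_middle (l₁ := [a,a,a,a]) (l₂ := [b]) (a := c)).symm).trans
        ((List.Perm.append_left [a,a,a,a] (List.Perm.swap b c [])).trans hp.symm))
      (by have l1 : c ≤ a := le_of_lt hca
          have l2 : a ≤ b := le_of_lt hab
          have l3 : c ≤ b := le_of_lt hcb
          simp only [List.pairwise_cons, List.mem_cons, List.not_mem_nil, forall_eq_or_imp,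
            false_implies, forall_const, and_true, List.Pairwise.nil]
          and_intros <;> first | exact le_refl _ | assumption)]
    simp [hca.ne, hab.ne]
  · -- b < a, a < c, b < c : sorted = [b,a,a,a,a,c]
    rw [PySem.List.sorted_id_eq_of_perm_of_pairwise _ [b,a,a,a,a,c]
      (((List.perm_middle (l₁ := [a,a,a,a]) (l₂ := [c]) (a := b)).symm).trans hp.symm)
      (by have l1 : b ≤ a := le_of_lt hba
          have l2 : a ≤ c := le_of_lt hac'
          have l3 : b ≤ c := le_of_lt hbc'
          simp only [List.pairwise_cons, List.mem_cons, List.not_mem_nil, forall_eq_or_imp,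
            false_implies, forall_const, and_true, List.Pairwise.nil]
          and_intros <;> first | exact le_refl _ | assumption)]
    simp [hba.ne, hac'.ne]
  · -- b < a, a < c, c < b : impossible
    exact absurd (hba.trans (hac'.trans hcb)) (lt_irrefl b)
  · -- b < a, c < a, b < c : sorted = [b,c,a,a,a,a]
    rw [PySem.List.sorted_id_eq_of_perm_of_pairwise _ [b,c,a,a,a,a]
      ((List.perm_append_comm (l₁ := [b,c]) (l₂ := [a,a,a,a])).trans hp.symm)
      (by have l1 : b ≤ a := le_of_lt hba
          have l2 : c ≤ a := le_of_lt hca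
          have l3 : b ≤ c := le_of_lt hbc'
          simp only [List.pairwise_cons, List.mem_cons, List.not_mem_nil, forall_eq_or_imp,
            false_implies, forall_const, and_true, List.Pairwise.nil]
          and_intros <;> first | exact le_refl _ | assumption)]
    simp [hba.ne, hca.ne, hbc'.ne]
  · -- b < a, c < a, c < b : sorted = [c,b,a,a,a,a]
    rw [PySem.List.sorted_id_eq_of_perm_of_pairwise _ [c,b,a,a,a,a]
      ((List.perm_append_comm (l₁ := [c,b]) (l₂ := [a,a,a,a])).trans
        ((List.Perm.append_left [a,a,a,a] (List.Perm.swap b c [])).trans hp.symm))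
      (by have l1 : c ≤ a := le_of_lt hca
          have l2 : b ≤ a := le_of_lt hba
          have l3 : c ≤ b := le_of_lt hcb
          simp only [List.pairwise_cons, List.mem_cons, List.not_mem_nil, forall_eq_or_imp,
            false_implies, forall_const, and_true, List.Pairwise.nil]
          and_intros <;> first | exact le_refl _ | assumption)]
    simp [hca.ne, hba.ne, hcb.ne]

-- the sorted-hand pattern forces QuadTwo (the quad block is contiguous in the sorted hand)
lemma quadtwo_of_pattern (combo : List String) (hlen : combo.length = 6)
    (h : QuadPattern combo = true) : QuadTwo combo := by
  obtain ⟨s0, s1, s2, s3, s4, s5, hs⟩ :=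
    six_of_len (PySem.List.sorted combo (fun x => x) false)
      (by rw [PySem.List.length_sorted, hlen])
  have hperm : combo.Perm [s0, s1, s2, s3, s4, s5] := by
    have := PySem.List.sorted_perm combo (fun x => x) false
    rw [hs] at this
    exact this.symm
  have hpw := PySem.List.sorted_pairwise combo (fun x => x)
  rw [hs] at hpw
  simp only [List.pairwise_cons, List.mem_cons, List.not_mem_nil, forall_eq_or_imp,
    false_implies, forall_const, and_true, List.Pairwise.nil] at hpw
  obtain ⟨⟨h01, h02, h03, h04, h05⟩, ⟨h12, h13, h14, h15⟩, ⟨h23, h24, h25⟩, ⟨h34, h35⟩, h45⟩ := hpw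
  unfold QuadPattern at h
  rw [hs] at h
  replace h : (if s0 == s3 then s3 != s4 && s4 != s5
      else if s1 == s4 then s0 != s1 && s4 != s5
      else if s2 == s5 then s0 != s1 && s1 != s2
      else false) = true := h
  by_cases e03 : s0 = s3
  · rw [if_pos (by simp [e03])] at h
    rw [Bool.and_eq_true, bne_iff_ne, bne_iff_ne] at h
    obtain ⟨n34, n45⟩ := h
    have e01 : s0 = s1 := le_antisymm h01 (e03 ▸ h13)
    have e02 : s0 = s2 := le_antisymm h02 (e03 ▸ h23)
    have h3lt : s3 < s4 := lt_of_le_of_ne h34 n34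
    have h4lt : s4 < s5 := lt_of_le_of_ne h45 n45
    refine ⟨s0, s4, s5, ?_, ?_, h4lt.ne, ?_⟩
    · rw [e03]; exact h3lt.ne
    · rw [e03]; exact (h3lt.trans h4lt).ne
    · rw [← e01, ← e02, ← e03] at hperm
      exact hperm
  · rw [if_neg (by simp [e03])] at h
    by_cases e14 : s1 = s4
    · rw [if_pos (by simp [e14])] at h
      rw [Bool.and_eq_true, bne_iff_ne, bne_iff_ne] at h
      obtain ⟨n01, n45⟩ := h
      have e12 : s1 = s2 := le_antisymm h12 (e14 ▸ h24)
      have e13 : s1 = s3 := le_antisymm h13 (e14 ▸ h34)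
      have h0lt : s0 < s1 := lt_of_le_of_ne h01 n01
      have h5gt : s1 < s5 := lt_of_le_of_ne (e14 ▸ h45) (e14 ▸ n45)
      refine ⟨s1, s0, s5, (fun hx => n01 hx.symm), h5gt.ne, (h0lt.trans h5gt).ne, ?_⟩
      refine hperm.trans ?_
      rw [← e12, ← e13, ← e14]
      exact (List.perm_middle (l₁ := [s1,s1,s1,s1]) (l₂ := [s5]) (a := s0)).symm
    · rw [if_neg (by simp [e14])] at h
      by_cases e25 : s2 = s5
      · rw [if_pos (by simp [e25])] at h
        rw [Bool.and_eq_true, bne_iff_ne, bne_iff_ne] at h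
        obtain ⟨n01, n12⟩ := h
        have e23 : s2 = s3 := le_antisymm h23 (e25 ▸ h35)
        have e24 : s2 = s4 := le_antisymm h24 (e25 ▸ h45)
        have h0lt : s0 < s1 := lt_of_le_of_ne h01 n01
        have h1lt : s1 < s2 := lt_of_le_of_ne h12 n12
        refine ⟨s2, s0, s1, (fun hx => (h0lt.trans h1lt).ne hx.symm), (fun hx => h1lt.ne hx.symm),
          h0lt.ne, ?_⟩
        refine hperm.trans ?_
        rw [← e23, ← e24, ← e25]
        exact List.perm_append_comm (l₁ := [s0, s1]) (l₂ := [s2, s2, s2, s2])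
      · rw [if_neg (by simp [e25])] at h
        exact absurd h (by simp)

-- B's core (the pattern on the sorted hand) holds iff QuadTwo, given 6 cards
lemma b_core_iff (combo : List String) (hlen : combo.length = 6) :
    (match PySem.List.sorted combo (fun x => x) false with
     | [s0, s1, s2, s3, s4, s5] =>
       if s0 == s3 then s3 != s4 && s4 != s5
       else if s1 == s4 then s0 != s1 && s4 != s5
       else if s2 == s5 then s0 != s1 && s1 != s2
       else false
     | _ => false) = true ↔ QuadTwo combo :=
  ⟨fun h => quadtwo_of_pattern combo hlen h, fun h => pattern_of_quadtwo combo h⟩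

-- ===== VERDICT (by name: the statement is the Claim_ definition above) =====
theorem is_quad_with_two_singles_spec : Claim_equal_is_quad_with_two_singles := by
  intro combo _
  unfold Spec_is_quad_with_two_singles is_quad_with_two_singles is_quad_with_two_singles_alt
  by_cases hlen : combo.length ≠ 6
  · rw [if_pos hlen, if_pos hlen]
  · rw [if_neg hlen, if_neg hlen]
    by_cases hbad : (combo.any fun card => !(RANK_ORDER.contains card)) = true
    · rw [if_pos hbad, if_pos hbad]
    · rw [if_neg hbad, if_neg hbad]
      by_cases hjok : (combo.contains "B" && combo.contains "R") = true
      · rw [if_pos hjok, if_pos hjok]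
      · rw [if_neg hjok, if_neg hjok]
        rw [Ne, not_not] at hlen
        simp only [getD_count, values_eq]
        rw [Bool.eq_iff_iff, a_core_iff combo, b_core_iff combo hlen]
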